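-- pv_equiv track=rewrite | github.com/mumba17/Modeling-Social-Creativity | knn.py | generate_k_values
-- ===== SOURCE A (Python) =====
-- def generate_k_values(max_k):
--     """
--     Generate a reasonable progression of k values to test.
--
--     Args:
--         max_k: Maximum k value to consider
--
--     Returns:
--         list: Sorted list of k values to test
--     """
--     k_values = []
--
--     if max_k < 3:
--         return [3]  # Ensure at least the minimum k
--
--     # Start with dense sampling for small k
--     k_values.extend(range(3, min(11, max_k + 1)))
--
--     if max_k > 10:
--         # Add values with increasing steps
--         k = 12
--         while k <= max_k:
--             if k <= 30:
--                 k_values.append(k)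
--                 k += 2  # Step by 2 up to 30
--             elif k <= 100:
--                 k_values.append(k)
--                 k += 10  # Step by 10 up to 100
--             else:
--                 k_values.append(k)
--                 k += 25  # Step by 25 beyond 100
--
--     return sorted(list(set(k_values)))  # Remove any duplicates
-- ===== SOURCE B (Python) =====
-- def generate_k_values(max_k):
--     """Scan 3..max_k once and keep each k that satisfies a closed-form
--     membership test for the progression (no generation, dedup or sort)."""
--     if max_k < 3:
--         return [3]
--
--     def keep(k):
--         if k <= 10:
--             return True
--         if k <= 30:
--             return k % 2 == 0
--         if k <= 100:
--             return k % 10 == 2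
--         return k % 25 == 2
--
--     return [k for k in range(3, max_k + 1) if keep(k)]
-- ===== Notes on version B (the rewrite author's own statement) =====
-- stated objective: alternative
-- what changed: Instead of generating the sequence with a variable-step while-loop and then deduplicating and sorting it, B scans every candidate k from 3 to max_k once and keeps k iff it satisfies a closed-form residue test (always for k<=10; even k for k<=30; k%10==2 for k<=100; k%25==2 beyond), so no set() and no sort are needed; the scan visits every integer up to max_k, so it trades the sort for a longer but simpler pass.
import Mathlib
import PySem

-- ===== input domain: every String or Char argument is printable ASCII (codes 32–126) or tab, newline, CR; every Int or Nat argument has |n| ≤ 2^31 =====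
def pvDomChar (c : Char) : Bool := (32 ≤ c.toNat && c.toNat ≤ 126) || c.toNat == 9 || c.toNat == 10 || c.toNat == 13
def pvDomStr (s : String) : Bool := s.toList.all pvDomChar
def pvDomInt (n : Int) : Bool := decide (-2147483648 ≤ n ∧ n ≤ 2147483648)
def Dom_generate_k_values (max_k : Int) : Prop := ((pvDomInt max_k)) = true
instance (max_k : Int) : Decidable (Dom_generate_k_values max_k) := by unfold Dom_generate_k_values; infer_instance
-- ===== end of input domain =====

-- B replaces A's generate-with-variable-step-then-dedup-and-sort by a single filtered
-- scan of 3..max_k with a closed-form membership test (simpler; no set, no sort).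

-- ===== PORT A =====
-- the while-loop of A: k is the loop variable, the produced appends are collected in
-- order; fuel only makes the recursion structural (it never runs out while k ≤ max_k)
def gkLoop : Nat → Int → Int → List Int
  | 0, _, _ => []
  | fuel + 1, k, max_k =>
    if k ≤ max_k then
      if k ≤ 30 then k :: gkLoop fuel (k + 2) max_k
      else if k ≤ 100 then k :: gkLoop fuel (k + 10) max_k
      else k :: gkLoop fuel (k + 25) max_k
    else []

def generate_k_values (max_k : Int) : List Int :=
  if max_k < 3 then [3]
  else
    let k_values := PySem.List.pyRange 3 (min 11 (max_k + 1)) 1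
    let k_values := if max_k > 10 then k_values ++ gkLoop (max_k + 1 - 12).toNat 12 max_k else k_values
    PySem.List.sorted (PySem.Set.ofList k_values) (fun x => x) false

-- ===== PORT B =====
-- the nested `keep` predicate of Source B
def gkKeep (k : Int) : Bool :=
  if k ≤ 10 then true
  else if k ≤ 30 then PySem.Int.mod k 2 == 0
  else if k ≤ 100 then PySem.Int.mod k 10 == 2
  else PySem.Int.mod k 25 == 2

def generate_k_values_alt (max_k : Int) : List Int :=
  if max_k < 3 then [3]
  else (PySem.List.pyRange 3 (max_k + 1) 1).filter gkKeep

-- ===== PRECONDITION & SPEC =====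
def Spec_generate_k_values (max_k : Int) (out : List Int) : Prop := out = generate_k_values_alt max_k
instance (max_k : Int) (out : List Int) : Decidable (Spec_generate_k_values max_k out) := by unfold Spec_generate_k_values; infer_instance

-- ===== CLAIM (what is proved, stated in full; the proofs are below) =====
def Claim_equal_generate_k_values : Prop := ∀ (max_k : Int), Dom_generate_k_values max_k → Spec_generate_k_values max_k (generate_k_values max_k)

-- ===== LEMMAS AND PROOFS =====

-- the four bands of values A's construction produces, written as ranges
def gkBands (max_k : Int) : List Int :=
  PySem.List.pyRange 3 (min 11 (max_k + 1)) 1 ++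
  PySem.List.pyRange 12 (min 31 (max_k + 1)) 2 ++
  PySem.List.pyRange 32 (min 101 (max_k + 1)) 10 ++
  PySem.List.pyRange 102 (max_k + 1) 25

-- range(a, b, s) with positive step s is empty when b ≤ a
theorem gk_pyRange_nil (a b s : Int) (hs : 0 < s) (h : b ≤ a) :
    PySem.List.pyRange a b s = [] := by
  rw [PySem.List.pyRange_of_pos a b hs]
  simp [show ¬ a < b by omega]

-- range(a, b, s) with positive step s and a < b starts with a
theorem gk_pyRange_cons (a b s : Int) (hs : 0 < s) (h : a < b) :
    PySem.List.pyRange a b s = a :: PySem.List.pyRange (a + s) b s := by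
  rw [PySem.List.pyRange_of_pos a b hs, PySem.List.pyRange_of_pos (a + s) b hs]
  by_cases h2 : a + s < b
  · have hdiv : (b - a + s - 1) / s = (b - (a + s) + s - 1) / s + 1 := by
      have := Int.add_mul_ediv_right (b - (a + s) + s - 1) 1 (show s ≠ 0 by omega)
      have he : b - (a + s) + s - 1 + 1 * s = b - a + s - 1 := by ring
      rw [he] at this; omega
    have hpos : 0 ≤ (b - (a + s) + s - 1) / s := by
      apply Int.ediv_nonneg <;> omega
    simp only [if_pos h, if_pos h2, hdiv]
    have : ((b - (a + s) + s - 1) / s + 1).toNat = ((b - (a + s) + s - 1) / s).toNat + 1 := by omega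
    rw [this, List.range_succ_eq_map]
    simp only [List.map_cons, List.map_map]
    congr 1
    · simp
    · apply List.map_congr_left
      intro k _
      simp only [Function.comp_apply]
      push_cast; ring
  · -- 0 < b - a ≤ s : exactly one element
    have hdiv : (b - a + s - 1) / s = 1 := by
      have h0 : (b - a - 1) / s = 0 := Int.ediv_eq_zero_of_lt (by omega) (by omega)
      have hadd := Int.add_mul_ediv_right (b - a - 1) 1 (show s ≠ 0 by omega)
      rw [show b - a - 1 + 1 * s = b - a + s - 1 by ring] at hadd
      omega
    simp only [if_pos h, if_neg h2, hdiv]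
    norm_num

-- extending the right end of range(a, b, s) by one picks up b iff b lands on the grid
theorem gk_pyRange_succ : ∀ (fuel : Nat) (a b s : Int), (b - a).toNat ≤ fuel → 0 < s →
    PySem.List.pyRange a (b + 1) s =
      PySem.List.pyRange a b s ++ (if a ≤ b ∧ (b - a) % s = 0 then [b] else []) := by
  intro fuel
  induction fuel with
  | zero =>
    intro a b s hn hs
    by_cases hab : b < a
    · rw [gk_pyRange_nil a (b + 1) s hs (by omega), gk_pyRange_nil a b s hs (by omega)]
      simp [show ¬ (a ≤ b) by omega]
    · have hba : a = b := by omega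
      subst hba
      rw [gk_pyRange_cons a (a + 1) s hs (by omega),
          gk_pyRange_nil (a + s) (a + 1) s hs (by omega),
          gk_pyRange_nil a a s hs (by omega)]
      simp
  | succ fuel ih =>
    intro a b s hn hs
    by_cases hab : b < a
    · rw [gk_pyRange_nil a (b + 1) s hs (by omega), gk_pyRange_nil a b s hs (by omega)]
      simp [show ¬ (a ≤ b) by omega]
    · by_cases hba : a = b
      · subst hba
        rw [gk_pyRange_cons a (a + 1) s hs (by omega),
            gk_pyRange_nil (a + s) (a + 1) s hs (by omega),
            gk_pyRange_nil a a s hs (by omega)]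
        simp
      · -- a < b
        have hlt : a < b := by omega
        rw [gk_pyRange_cons a (b + 1) s hs (by omega), gk_pyRange_cons a b s hs hlt,
            ih (a + s) b s (by omega) hs]
        have hmodeq : (b - (a + s)) % s = (b - a) % s := by
          rw [show b - (a + s) = b - a - s by ring, Int.sub_emod_right]
        by_cases hdvd : (b - a) % s = 0
        · have hsle : a + s ≤ b := by
            rcases Int.dvd_of_emod_eq_zero hdvd with ⟨q, hq⟩
            have : 1 ≤ q := by nlinarith
            nlinarith
          have h1 : a ≤ b ∧ (b - a) % s = 0 := ⟨by omega, hdvd⟩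
          have h2 : a + s ≤ b ∧ (b - (a + s)) % s = 0 := ⟨hsle, by omega⟩
          rw [if_pos h2, if_pos h1]
          simp
        · have hcond1 : ¬ (a ≤ b ∧ (b - a) % s = 0) := by tauto
          have hcond2 : ¬ (a + s ≤ b ∧ (b - (a + s)) % s = 0) := by
            rintro ⟨_, h2⟩; exact hdvd (by omega)
          rw [if_neg hcond1, if_neg hcond2]
          simp

-- phase 3 of A's loop (k > 100, step 25) is range(k, max_k+1, 25)
theorem gk_phase3 : ∀ (fuel : Nat) (k max_k : Int), (max_k + 1 - k).toNat ≤ fuel → 100 < k →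
    gkLoop fuel k max_k = PySem.List.pyRange k (max_k + 1) 25 := by
  intro fuel
  induction fuel with
  | zero =>
    intro k max_k hn hk
    rw [gkLoop, gk_pyRange_nil k (max_k + 1) 25 (by omega) (by omega)]
  | succ fuel ih =>
    intro k max_k hn hk
    rw [gkLoop]
    by_cases hle : k ≤ max_k
    · rw [if_pos hle, if_neg (by omega), if_neg (by omega)]
      rw [gk_pyRange_cons k (max_k + 1) 25 (by omega) (by omega)]
      rw [ih (k + 25) max_k (by omega) (by omega)]
    · rw [if_neg hle, gk_pyRange_nil k (max_k + 1) 25 (by omega) (by omega)]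

-- phase 2 of A's loop (30 < k ≤ 102, k ≡ 2 mod 10) is range(k, min(101, max_k+1), 10) ++ phase 3 from 102
theorem gk_phase2 : ∀ (fuel : Nat) (k max_k : Int), (max_k + 1 - k).toNat ≤ fuel →
    30 < k → k ≤ 102 → (10 : Int) ∣ (k - 2) →
    gkLoop fuel k max_k = PySem.List.pyRange k (min 101 (max_k + 1)) 10 ++
                          PySem.List.pyRange 102 (max_k + 1) 25 := by
  intro fuel
  induction fuel with
  | zero =>
    intro k max_k hn hk1 hk2 hd
    rw [gkLoop]
    rw [gk_pyRange_nil k (min 101 (max_k + 1)) 10 (by omega) (by omega),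
        gk_pyRange_nil 102 (max_k + 1) 25 (by omega) (by omega)]
    simp
  | succ fuel ih =>
    intro k max_k hn hk1 hk2 hd
    by_cases hle : k ≤ max_k
    · by_cases h100 : k ≤ 100
      · rw [gkLoop]
        rw [if_pos hle, if_neg (by omega), if_pos h100]
        rw [gk_pyRange_cons k (min 101 (max_k + 1)) 10 (by omega) (by omega)]
        rw [ih (k + 10) max_k (by omega) (by omega) (by omega) (by omega)]
        simp
      · have : k = 102 := by omega
        subst this
        rw [gk_phase3 (fuel + 1) 102 max_k (by omega) (by omega)]
        rw [gk_pyRange_nil 102 (min 101 (max_k + 1)) 10 (by omega) (by omega)]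
        simp
    · rw [gkLoop]
      rw [if_neg hle]
      rw [gk_pyRange_nil k (min 101 (max_k + 1)) 10 (by omega) (by omega),
          gk_pyRange_nil 102 (max_k + 1) 25 (by omega) (by omega)]
      simp

-- phase 1 of A's loop (10 < k ≤ 32, k even) is range(k, min(31, max_k+1), 2) ++ the later phases
theorem gk_phase1 : ∀ (fuel : Nat) (k max_k : Int), (max_k + 1 - k).toNat ≤ fuel →
    10 < k → k ≤ 32 → (2 : Int) ∣ k →
    gkLoop fuel k max_k = PySem.List.pyRange k (min 31 (max_k + 1)) 2 ++
                          (PySem.List.pyRange 32 (min 101 (max_k + 1)) 10 ++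
                           PySem.List.pyRange 102 (max_k + 1) 25) := by
  intro fuel
  induction fuel with
  | zero =>
    intro k max_k hn hk1 hk2 hd
    rw [gkLoop]
    rw [gk_pyRange_nil k (min 31 (max_k + 1)) 2 (by omega) (by omega),
        gk_pyRange_nil 32 (min 101 (max_k + 1)) 10 (by omega) (by omega),
        gk_pyRange_nil 102 (max_k + 1) 25 (by omega) (by omega)]
    simp
  | succ fuel ih =>
    intro k max_k hn hk1 hk2 hd
    by_cases hle : k ≤ max_k
    · by_cases h30 : k ≤ 30
      · rw [gkLoop]
        rw [if_pos hle, if_pos h30]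
        rw [gk_pyRange_cons k (min 31 (max_k + 1)) 2 (by omega) (by omega)]
        rw [ih (k + 2) max_k (by omega) (by omega) (by omega) (by omega)]
        simp
      · have : k = 32 := by omega
        subst this
        rw [gk_phase2 (fuel + 1) 32 max_k (by omega) (by omega) (by omega) (by omega)]
        rw [gk_pyRange_nil 32 (min 31 (max_k + 1)) 2 (by omega) (by omega)]
        simp
    · rw [gkLoop]
      rw [if_neg hle]
      rw [gk_pyRange_nil k (min 31 (max_k + 1)) 2 (by omega) (by omega),
          gk_pyRange_nil 32 (min 101 (max_k + 1)) 10 (by omega) (by omega),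
          gk_pyRange_nil 102 (max_k + 1) 25 (by omega) (by omega)]
      simp

-- growing max_k by one adds max_k+1 to the bands exactly when gkKeep accepts it
theorem gk_bands_succ (mk : Int) (h3 : 3 ≤ mk) :
    gkBands (mk + 1) = gkBands mk ++ (if gkKeep (mk + 1) then [mk + 1] else []) := by
  have hmod2 : PySem.Int.mod (mk + 1) 2 = (mk + 1) % 2 :=
    PySem.Int.mod_eq_emod_of_pos (by omega)
  have hmod10 : PySem.Int.mod (mk + 1) 10 = (mk + 1) % 10 :=
    PySem.Int.mod_eq_emod_of_pos (by omega)
  have hmod25 : PySem.Int.mod (mk + 1) 25 = (mk + 1) % 25 :=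
    PySem.Int.mod_eq_emod_of_pos (by omega)
  unfold gkBands gkKeep
  by_cases hA : mk + 1 ≤ 10
  · -- band 1 grows, bands 2-4 stay empty
    rw [show min 11 (mk + 1 + 1) = mk + 1 + 1 by omega, show min 11 (mk + 1) = mk + 1 by omega,
        PySem.List.pyRange_one_succ_right (by omega : (3:Int) ≤ mk + 1)]
    rw [gk_pyRange_nil 12 (min 31 (mk + 1 + 1)) 2 (by omega) (by omega),
        gk_pyRange_nil 12 (min 31 (mk + 1)) 2 (by omega) (by omega),
        gk_pyRange_nil 32 (min 101 (mk + 1 + 1)) 10 (by omega) (by omega),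
        gk_pyRange_nil 32 (min 101 (mk + 1)) 10 (by omega) (by omega),
        gk_pyRange_nil 102 (mk + 1 + 1) 25 (by omega) (by omega),
        gk_pyRange_nil 102 (mk + 1) 25 (by omega) (by omega)]
    simp [show mk + 1 ≤ 10 by omega]
  · by_cases hB : mk + 1 ≤ 30
    · -- band 2 region (11 ≤ mk+1 ≤ 30)
      rw [show min 11 (mk + 1 + 1) = 11 by omega, show min 11 (mk + 1) = 11 by omega]
      rw [gk_pyRange_nil 32 (min 101 (mk + 1 + 1)) 10 (by omega) (by omega),
          gk_pyRange_nil 32 (min 101 (mk + 1)) 10 (by omega) (by omega),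
          gk_pyRange_nil 102 (mk + 1 + 1) 25 (by omega) (by omega),
          gk_pyRange_nil 102 (mk + 1) 25 (by omega) (by omega)]
      by_cases hC : mk + 1 ≤ 11
      · -- mk+1 = 11: band 2 still empty on both sides, and 11 is odd so keep is False
        have h11 : mk + 1 = 11 := by omega
        rw [gk_pyRange_nil 12 (min 31 (mk + 1 + 1)) 2 (by omega) (by omega),
            gk_pyRange_nil 12 (min 31 (mk + 1)) 2 (by omega) (by omega)]
        simp [h11]
      · -- 12 ≤ mk+1 ≤ 30: band 2 extends by one slot
        rw [show min 31 (mk + 1 + 1) = mk + 1 + 1 by omega,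
            show min 31 (mk + 1) = mk + 1 by omega,
            gk_pyRange_succ (mk + 1 - 12).toNat 12 (mk + 1) 2 (by omega) (by omega)]
        simp only [show (12:Int) ≤ mk + 1 by omega, true_and,
          show (mk + 1 - 12) % 2 = (mk + 1) % 2 by omega]
        simp only [if_neg (show ¬ (mk + 1 ≤ 10) by omega), if_pos hB, hmod2]
        by_cases he : (mk + 1) % 2 = 0 <;> simp [he]
    · by_cases hD : mk + 1 ≤ 31
      · -- mk+1 = 31: nothing changes, keep is False (31 % 10 ≠ 2)
        have h31 : mk + 1 = 31 := by omega
        rw [show min 11 (mk + 1 + 1) = 11 by omega, show min 11 (mk + 1) = 11 by omega,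
            show min 31 (mk + 1 + 1) = 31 by omega, show min 31 (mk + 1) = 31 by omega]
        rw [gk_pyRange_nil 32 (min 101 (mk + 1 + 1)) 10 (by omega) (by omega),
            gk_pyRange_nil 32 (min 101 (mk + 1)) 10 (by omega) (by omega),
            gk_pyRange_nil 102 (mk + 1 + 1) 25 (by omega) (by omega),
            gk_pyRange_nil 102 (mk + 1) 25 (by omega) (by omega)]
        simp [h31]
      · by_cases hE : mk + 1 ≤ 100
        · -- band 3 region (32 ≤ mk+1 ≤ 100)
          rw [show min 11 (mk + 1 + 1) = 11 by omega, show min 11 (mk + 1) = 11 by omega,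
              show min 31 (mk + 1 + 1) = 31 by omega, show min 31 (mk + 1) = 31 by omega,
              show min 101 (mk + 1 + 1) = mk + 1 + 1 by omega,
              show min 101 (mk + 1) = mk + 1 by omega,
              gk_pyRange_succ (mk + 1 - 32).toNat 32 (mk + 1) 10 (by omega) (by omega)]
          rw [gk_pyRange_nil 102 (mk + 1 + 1) 25 (by omega) (by omega),
              gk_pyRange_nil 102 (mk + 1) 25 (by omega) (by omega)]
          have hLif : (32 ≤ mk + 1 ∧ (mk + 1 - 32) % 10 = 0) ↔ (mk + 1) % 10 = 2 := by omega
          by_cases he : (mk + 1) % 10 = 2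
          · rw [if_pos (hLif.mpr he)]
            simp [he, show ¬ (mk + 1 ≤ 10) by omega, show ¬ (mk + 1 ≤ 30) by omega, hE]
          · rw [if_neg (fun hc => he (hLif.mp hc))]
            simp [he, show ¬ (mk + 1 ≤ 10) by omega, show ¬ (mk + 1 ≤ 30) by omega, hE]
        · by_cases hF : mk + 1 ≤ 101
          · -- mk+1 = 101: nothing changes, keep is False (101 % 25 ≠ 2)
            have h101 : mk + 1 = 101 := by omega
            rw [show min 11 (mk + 1 + 1) = 11 by omega, show min 11 (mk + 1) = 11 by omega,
                show min 31 (mk + 1 + 1) = 31 by omega, show min 31 (mk + 1) = 31 by omega,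
                show min 101 (mk + 1 + 1) = 101 by omega, show min 101 (mk + 1) = 101 by omega]
            rw [gk_pyRange_nil 102 (mk + 1 + 1) 25 (by omega) (by omega),
                gk_pyRange_nil 102 (mk + 1) 25 (by omega) (by omega)]
            simp [h101]
          · -- band 4 region (mk+1 ≥ 102)
            rw [show min 11 (mk + 1 + 1) = 11 by omega, show min 11 (mk + 1) = 11 by omega,
                show min 31 (mk + 1 + 1) = 31 by omega, show min 31 (mk + 1) = 31 by omega,
                show min 101 (mk + 1 + 1) = 101 by omega, show min 101 (mk + 1) = 101 by omega,
                gk_pyRange_succ (mk + 1 - 102).toNat 102 (mk + 1) 25 (by omega) (by omega)]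
            have hLif : (102 ≤ mk + 1 ∧ (mk + 1 - 102) % 25 = 0) ↔ (mk + 1) % 25 = 2 := by omega
            by_cases he : (mk + 1) % 25 = 2
            · rw [if_pos (hLif.mpr he)]
              simp [he, show ¬ (mk + 1 ≤ 10) by omega, show ¬ (mk + 1 ≤ 30) by omega,
                    show ¬ (mk + 1 ≤ 100) by omega]
            · rw [if_neg (fun hc => he (hLif.mp hc))]
              simp [he, show ¬ (mk + 1 ≤ 10) by omega, show ¬ (mk + 1 ≤ 30) by omega,
                    show ¬ (mk + 1 ≤ 100) by omega]

-- B's filtered scan produces exactly the four bands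
theorem gk_filter_eq_bands : ∀ (n : Nat) (mk : Int), mk = 3 + (n : Int) →
    (PySem.List.pyRange 3 (mk + 1) 1).filter gkKeep = gkBands mk := by
  intro n
  induction n with
  | zero => intro mk h; subst h; decide
  | succ n ih =>
    intro mk h
    have hmk : mk = (3 + (n : Int)) + 1 := by push_cast at h ⊢; omega
    subst hmk
    set m := 3 + (n : Int) with hm
    have h3 : 3 ≤ m := by omega
    rw [PySem.List.pyRange_one_succ_right (show (3:Int) ≤ m + 1 by omega),
        List.filter_append, ih m rfl, gk_bands_succ m h3]
    congr 1
    by_cases hk : gkKeep (m + 1) <;> simp [hk]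

-- the filtered scan is strictly increasing
theorem gk_filter_pairwise (mk : Int) :
    ((PySem.List.pyRange 3 (mk + 1) 1).filter gkKeep).Pairwise (· < ·) :=
  List.Pairwise.filter _ (PySem.List.pairwise_lt_pyRange_one 3 (mk + 1))

-- ===== VERDICT (by name: the statement is the Claim_ definition above) =====
theorem generate_k_values_spec : Claim_equal_generate_k_values := by
  intro max_k _
  unfold Spec_generate_k_values generate_k_values generate_k_values_alt
  by_cases h3 : max_k < 3
  · simp [h3]
  · simp only [if_neg h3]
    -- the list A builds before sorted(set(...)) equals B's filtered scan
    have hL : (if max_k > 10 then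
          PySem.List.pyRange 3 (min 11 (max_k + 1)) 1 ++ gkLoop (max_k + 1 - 12).toNat 12 max_k
        else PySem.List.pyRange 3 (min 11 (max_k + 1)) 1)
        = (PySem.List.pyRange 3 (max_k + 1) 1).filter gkKeep := by
      rw [gk_filter_eq_bands (max_k - 3).toNat max_k (by omega)]
      unfold gkBands
      by_cases h10 : max_k > 10
      · rw [if_pos h10,
            gk_phase1 (max_k + 1 - 12).toNat 12 max_k (by omega) (by omega) (by omega) (by omega)]
        simp [List.append_assoc]
      · rw [if_neg h10,
            gk_pyRange_nil 12 (min 31 (max_k + 1)) 2 (by omega) (by omega),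
            gk_pyRange_nil 32 (min 101 (max_k + 1)) 10 (by omega) (by omega),
            gk_pyRange_nil 102 (max_k + 1) 25 (by omega) (by omega)]
        simp
    rw [hL]
    set F := (PySem.List.pyRange 3 (max_k + 1) 1).filter gkKeep with hF
    have hpw : F.Pairwise (· < ·) := gk_filter_pairwise max_k
    have hnd : F.Nodup := hpw.imp (fun h => ne_of_lt h)
    have hperm : F.Perm (PySem.Set.ofList F) := by
      rw [List.perm_ext_iff_of_nodup hnd (PySem.Set.nodup_ofList F)]
      intro a
      exact (PySem.Set.mem_ofList F a).symm
    exact PySem.List.sorted_eq_of_perm_of_pairwise_lt (PySem.Set.ofList F) F (fun x => x) hperm hpw
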